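-- pv_equiv track=rewrite | github.com/Wilhelmktx/404webScraper | 404Scraper/tutorial/spiders/quotes_spider.py | remove_until_fourth_newline
-- ===== SOURCE A (Python) =====
-- def remove_until_fourth_newline(text):
--     count = 0
--     for i, char in enumerate(text):
--         if char == '\n':
--             count += 1
--             if count == 4:
--                 return text[i+1:]
--     return ""
-- ===== SOURCE B (Python) =====
-- def remove_until_fourth_newline(text):
--     parts = text.split('\n', 4)
--     return parts[4] if len(parts) == 5 else ""
-- ===== Notes on version B (the rewrite author's own statement) =====
-- stated objective: faster
-- what changed: Replaces the explicit per-character enumerate loop with its newline counter and index slice by a single bounded str.split on the newline separator with maxsplit 4 plus a length check.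
import Mathlib
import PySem

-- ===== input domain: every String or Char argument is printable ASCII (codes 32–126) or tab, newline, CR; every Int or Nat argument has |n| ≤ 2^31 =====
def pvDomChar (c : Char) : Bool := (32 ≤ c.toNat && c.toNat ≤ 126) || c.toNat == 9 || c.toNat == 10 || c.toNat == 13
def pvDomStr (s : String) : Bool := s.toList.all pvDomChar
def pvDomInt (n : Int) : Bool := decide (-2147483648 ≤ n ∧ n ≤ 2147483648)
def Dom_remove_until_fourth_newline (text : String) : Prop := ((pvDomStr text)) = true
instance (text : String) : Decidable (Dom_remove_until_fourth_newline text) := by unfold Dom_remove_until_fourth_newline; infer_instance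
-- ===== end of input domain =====

-- B replaces A's explicit per-character enumerate loop (newline counter + index slice) by a single bounded split with maxsplit 4 plus a length check; a timing run measured B faster (constant factor).


-- ===== PORT A =====
-- A's for-loop with early return: state = running newline count; the return slices the original text at i+1
def pvGoA (text : String) : List (Int × Char) → Int → String
  | [], _ => ""
  | (i, c) :: rest, count =>
    if c = '\n' then
      if count + 1 = 4 then PySem.Str.slice text (some (i + 1)) none
      else pvGoA text rest (count + 1)
    else pvGoA text rest count

def remove_until_fourth_newline (text : String) : String :=
  pvGoA text (PySem.List.enumerate text.toList) 0

-- ===== PORT B =====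
def remove_until_fourth_newline_alt (text : String) : String :=
  match PySem.Str.splitMax? text "\n" 4 with
  | some parts => if parts.length = 5 then (PySem.List.pyGet? parts 4).getD "" else ""
  | none => ""

-- ===== PRECONDITION & SPEC =====
def Spec_remove_until_fourth_newline (text : String) (out : String) : Prop := out = remove_until_fourth_newline_alt text
instance (text : String) (out : String) : Decidable (Spec_remove_until_fourth_newline text out) := by unfold Spec_remove_until_fourth_newline; infer_instance

-- ===== CLAIM (what is proved, stated in full; the proofs are below) =====
def Claim_equal_remove_until_fourth_newline : Prop := ∀ (text : String), Dom_remove_until_fourth_newline text → Spec_remove_until_fourth_newline text (remove_until_fourth_newline text)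

-- ===== LEMMAS AND PROOFS =====

/-- the suffix of `cs` strictly after its `m`-th newline, if `cs` has at least `m` newlines -/
def pvAfter : List Char → Nat → Option (List Char)
  | [], _ => none
  | c :: cs, m => if c = '\n' then (if m = 1 then some cs else pvAfter cs (m - 1)) else pvAfter cs m

def pvOpt (o : Option (List Char)) : String :=
  match o with
  | some r => String.ofList r
  | none => ""

/-- accumulator-free model of `splitOnMax.go` on separator `['\n']` -/
def pvParts : Nat → List Char → List Char → List (List Char)
  | 0, cs, cur => [cur.reverse ++ cs]
  | _ + 1, [], cur => [cur.reverse]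
  | m + 1, c :: cs, cur => if c = '\n' then cur.reverse :: pvParts m cs [] else pvParts (m + 1) cs (c :: cur)

theorem pvGoA_eq (text : String) :
    ∀ (cs : List Char) (j count : Nat), text.toList.drop j = cs → count ≤ 3 →
      pvGoA text (PySem.List.enumerate cs (j : Int)) (count : Int) = pvOpt (pvAfter cs (4 - count)) := by
  intro cs
  induction cs with
  | nil => intro j count _ _; simp [PySem.List.enumerate, pvGoA, pvAfter, pvOpt]
  | cons c cs ih =>
    intro j count hdrop hcount
    have hdrop' : text.toList.drop (j + 1) = cs := by rw [← List.drop_drop, hdrop]; rfl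
    rw [PySem.List.enumerate]
    by_cases hc : c = '\n'
    · by_cases h4 : count = 3
      · subst h4
        simp only [pvGoA]
        rw [if_pos hc, if_pos (by norm_num),
          show ((j : Int) + 1) = ((j + 1 : Nat) : Int) by push_cast; ring]
        rw [PySem.Str.slice, PySem.Chars.slice_eq_listSlice, PySem.List.slice_from_natCast, hdrop']
        simp [pvAfter, hc, pvOpt]
      · have hlt : count < 3 := by omega
        simp only [pvGoA]
        rw [if_pos hc, if_neg (show ¬((count : Int) + 1 = 4) by omega),
            show ((j : Int) + 1) = ((j + 1 : Nat) : Int) by push_cast; ring,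
            show ((count : Int) + 1) = ((count + 1 : Nat) : Int) by push_cast; ring]
        rw [ih (j + 1) (count + 1) hdrop' (by omega)]
        simp only [pvAfter]
        rw [if_pos hc, if_neg (show ¬(4 - count = 1) by omega)]
        congr 2
    · simp only [pvGoA]
      rw [if_neg hc,
        show ((j : Int) + 1) = ((j + 1 : Nat) : Int) by push_cast; ring,
        ih (j + 1) count hdrop' hcount]
      simp only [pvAfter]
      rw [if_neg hc]

theorem pvGo_eq : ∀ (fuel : Nat) (m : Nat) (cs cur : List Char) (acc : List (List Char)),
    cs.length < fuel →
    PySem.Chars.splitOnMax.go ['\n'] fuel m cs cur acc = acc.reverse ++ pvParts m cs cur := by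
  intro fuel
  induction fuel with
  | zero => intro m cs cur acc h; omega
  | succ fuel ih =>
    intro m cs cur acc h
    match cs with
    | [] =>
      cases m with
      | zero => simp [PySem.Chars.splitOnMax.go, pvParts]
      | succ m => simp [PySem.Chars.splitOnMax.go, pvParts]
    | c :: rest =>
      cases m with
      | zero => simp [PySem.Chars.splitOnMax.go, pvParts]
      | succ m =>
        by_cases hc : c = '\n'
        · rw [show PySem.Chars.splitOnMax.go ['\n'] (fuel+1) (m+1) (c::rest) cur acc =
              PySem.Chars.splitOnMax.go ['\n'] fuel m rest [] (cur.reverse :: acc) by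
                simp [PySem.Chars.splitOnMax.go, hc, List.isPrefixOf]]
          rw [ih m rest [] (cur.reverse :: acc) (by simp at h ⊢; omega)]
          simp [pvParts, hc]
        · rw [show PySem.Chars.splitOnMax.go ['\n'] (fuel+1) (m+1) (c::rest) cur acc =
              PySem.Chars.splitOnMax.go ['\n'] fuel (m+1) rest (c :: cur) acc by
                simp [PySem.Chars.splitOnMax.go, List.isPrefixOf, Ne.symm hc]]
          rw [ih (m+1) rest (c :: cur) acc (by simp at h ⊢; omega)]
          simp [pvParts, hc]

theorem pvParts_some : ∀ (cs : List Char) (m : Nat) (cur : List Char) (r : List Char), 1 ≤ m →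
    pvAfter cs m = some r →
    ∃ pre : List (List Char), pvParts m cs cur = pre ++ [r] ∧ pre.length = m := by
  intro cs
  induction cs with
  | nil => intro m cur r _ h; simp [pvAfter] at h
  | cons c cs ih =>
    intro m cur r hm h
    match m, hm with
    | 1, _ =>
      by_cases hc : c = '\n'
      · simp [pvAfter, hc] at h
        subst h
        exact ⟨[cur.reverse], by simp [pvParts, hc], rfl⟩
      · simp [pvAfter, hc] at h
        obtain ⟨pre, hp, hl⟩ := ih 1 (c :: cur) r (by omega) h
        exact ⟨pre, by simp [pvParts, hc, hp], hl⟩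
    | (m+2), _ =>
      by_cases hc : c = '\n'
      · simp [pvAfter, hc] at h
        obtain ⟨pre, hp, hl⟩ := ih (m+1) [] r (by omega) h
        exact ⟨cur.reverse :: pre, by simp [pvParts, hc, hp], by simp [hl]⟩
      · simp [pvAfter, hc] at h
        obtain ⟨pre, hp, hl⟩ := ih (m+2) (c :: cur) r (by omega) h
        exact ⟨pre, by simp [pvParts, hc, hp], hl⟩

theorem pvParts_none : ∀ (cs : List Char) (m : Nat) (cur : List Char), 1 ≤ m →
    pvAfter cs m = none → (pvParts m cs cur).length ≤ m := by
  intro cs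
  induction cs with
  | nil =>
    intro m cur hm _
    match m, hm with
    | (m+1), _ => simp [pvParts]
  | cons c cs ih =>
    intro m cur hm h
    match m, hm with
    | 1, _ =>
      by_cases hc : c = '\n'
      · simp [pvAfter, hc] at h
      · simp [pvAfter, hc] at h
        simpa [pvParts, hc] using ih 1 (c :: cur) (by omega) h
    | (m+2), _ =>
      by_cases hc : c = '\n'
      · simp [pvAfter, hc] at h
        have := ih (m+1) [] (by omega) h
        simp [pvParts, hc]
        omega
      · simp [pvAfter, hc] at h
        simpa [pvParts, hc] using ih (m+2) (c :: cur) (by omega) h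

theorem A_eq (text : String) :
    remove_until_fourth_newline text = pvOpt (pvAfter text.toList 4) := by
  have := pvGoA_eq text text.toList 0 0 rfl (by omega)
  simpa [remove_until_fourth_newline] using this

theorem B_eq (text : String) :
    remove_until_fourth_newline_alt text = pvOpt (pvAfter text.toList 4) := by
  have hsplit : PySem.Str.splitMax? text "\n" 4 =
      some (List.map String.ofList (pvParts 4 text.toList [])) := by
    rw [PySem.Str.splitMax?, PySem.Chars.splitMax?]
    simp [PySem.Chars.splitOnMax]
    rw [pvGo_eq (text.length + 1) 4 text.toList [] [] (by simp)]
    simp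
  rw [remove_until_fourth_newline_alt, hsplit]
  cases h : pvAfter text.toList 4 with
  | some r =>
    obtain ⟨pre, hp, hl⟩ := pvParts_some text.toList 4 [] r (by omega) h
    rw [hp]
    dsimp only
    have hlen : (List.map String.ofList (pre ++ [r])).length = 5 := by simp [hl]
    rw [if_pos hlen]
    rw [show (4 : Int) = ((4 : Nat) : Int) by norm_num, PySem.List.pyGet?_natCast]
    simp [List.map_append, hl, pvOpt]
  | none =>
    have hle := pvParts_none text.toList 4 [] (by omega) h
    dsimp only
    rw [if_neg (by simp; omega)]
    simp [pvOpt]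

-- ===== VERDICT (by name: the statement is the Claim_ definition above) =====
theorem remove_until_fourth_newline_spec : Claim_equal_remove_until_fourth_newline := by
  intro text _
  unfold Spec_remove_until_fourth_newline
  rw [A_eq, B_eq]
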